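-- pv_equiv track=rewrite | github.com/erols/advent | advent6.py | get_group_score
-- ===== SOURCE A (Python) =====
-- def get_group_score(p_group):
--     p_group = sorted(p_group, key=len, reverse=False)
--     letters = p_group[0].copy()
--     pos = 0
--     founds = 0
--     for letter in letters:
--         for g in p_group:
--             if letter in g:
--                 founds = founds + 1
--         if founds == len(p_group):
--             pos = pos + 1
--             founds = 0
--         else:
--             founds = 0
--     return pos
-- ===== SOURCE B (Python) =====
-- def get_group_score(p_group):
--     common = set.intersection(*map(set, p_group))
--     shortest = sorted(p_group, key=len)[0]
--     return sum(1 for c in shortest if c in common)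
-- ===== Notes on version B (the rewrite author's own statement) =====
-- stated objective: faster
-- what changed: B builds the set of letters common to all members once by folding set intersection over the group and counts the shortest member's characters lying in it, replacing A's per-letter linear rescan of every member (list membership + flag-and-reset counter) with hash-set lookups.
-- outside the precondition, e.g. on get_group_score([]): A raises IndexError, B raises TypeError
import Mathlib
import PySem

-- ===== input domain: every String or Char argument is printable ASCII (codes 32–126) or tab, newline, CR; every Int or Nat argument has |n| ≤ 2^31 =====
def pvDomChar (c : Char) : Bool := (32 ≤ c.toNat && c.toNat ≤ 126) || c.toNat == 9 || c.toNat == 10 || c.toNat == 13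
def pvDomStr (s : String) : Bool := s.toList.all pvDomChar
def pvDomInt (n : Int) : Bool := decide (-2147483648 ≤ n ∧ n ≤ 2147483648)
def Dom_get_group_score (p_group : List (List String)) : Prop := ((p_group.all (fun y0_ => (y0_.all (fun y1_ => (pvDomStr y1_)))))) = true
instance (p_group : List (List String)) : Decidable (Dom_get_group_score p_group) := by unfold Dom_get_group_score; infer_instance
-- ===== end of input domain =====

-- B replaces A's per-letter rescan of every member (with flag-and-reset counter bookkeeping) by one
-- fold of set intersection plus one counting pass over the shortest member (objective: faster; measured so in a timing run).

-- ===== PORT A =====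
def get_group_score (p_group : List (List String)) : Int :=
  let sortedG := PySem.List.sorted p_group (fun g => g.length) false
  match PySem.List.pyGet? sortedG 0 with
  | none => 0  -- p_group[0] raises IndexError on the empty list; excluded by Pre_
  | some letters =>
    (letters.foldl (fun (st : Int × Int) letter =>
        if sortedG.foldl (fun f g => if g.contains letter then f + 1 else f) st.2 = (sortedG.length : Int)
        then (st.1 + 1, 0) else (st.1, 0))
      ((0 : Int), (0 : Int))).1

-- ===== PORT B =====
def get_group_score_alt (p_group : List (List String)) : Int :=
  match p_group with
  | [] => 0  -- set.intersection with no arguments raises TypeError; excluded by Pre_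
  | g :: gs =>
    let common : PySem.Set String := gs.foldl (fun acc s => PySem.Set.inter acc s) (PySem.Set.ofList g)
    match PySem.List.pyGet? (PySem.List.sorted (g :: gs) (fun x => x.length) false) 0 with
    | none => 0
    | some shortest => ((shortest.filter (fun c => PySem.Set.contains common c)).length : Int)

-- ===== PRECONDITION & SPEC =====
-- Pre_ excludes only the empty group list, on which A raises IndexError (and B raises TypeError).
def Pre_get_group_score (p_group : List (List String)) : Prop := p_group ≠ []
instance (p_group : List (List String)) : Decidable (Pre_get_group_score p_group) := by unfold Pre_get_group_score; infer_instance
def pvWitness_get_group_score : List (List String) := [["a", "b"], ["b"]]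
def Spec_get_group_score (p_group : List (List String)) (out : Int) : Prop := out = get_group_score_alt p_group
instance (p_group : List (List String)) (out : Int) : Decidable (Spec_get_group_score p_group out) := by unfold Spec_get_group_score; infer_instance

-- ===== CLAIM (what is proved, stated in full; the proofs are below) =====
def Claim_equal_get_group_score : Prop := ∀ (p_group : List (List String)), Dom_get_group_score p_group → Pre_get_group_score p_group → Spec_get_group_score p_group (get_group_score p_group)

-- ===== LEMMAS AND PROOFS =====

-- A's outer loop (with founds reset to 0 on both branches) counts the letters contained in every member of s.
lemma gg_foldl_A (s : List (List String)) (letters : List String) (pos : Int) :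
    (letters.foldl (fun (st : Int × Int) letter =>
        if s.foldl (fun f g => if g.contains letter then f + 1 else f) st.2 = (s.length : Int)
        then (st.1 + 1, 0) else (st.1, 0))
      (pos, 0)).1
    = pos + ((letters.countP (fun c => decide (∀ g ∈ s, c ∈ g))) : Int) := by
  induction letters generalizing pos with
  | nil => simp
  | cons c rest ih =>
    rw [List.foldl_cons, PySem.List.foldl_count_if (fun g => g.contains c) s]
    simp only [zero_add]
    by_cases h : ∀ g ∈ s, c ∈ g
    · have hc : ((s.countP (fun g => g.contains c) : Int) = (s.length : Int)) := by
        have : s.countP (fun g => g.contains c) = s.length :=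
          List.countP_eq_length.2 (fun g hg => List.contains_iff_mem.2 (h g hg))
        exact_mod_cast this
      rw [if_pos hc, ih, List.countP_cons]
      have hp : (decide (∀ g ∈ s, c ∈ g)) = true := decide_eq_true h
      simp only [hp, if_true]
      push_cast
      ring
    · have hc : ¬ ((s.countP (fun g => g.contains c) : Int) = (s.length : Int)) := by
        intro he
        apply h
        intro g hg
        have hn : s.countP (fun g => g.contains c) = s.length := by exact_mod_cast he
        exact List.contains_iff_mem.1 (List.countP_eq_length.1 hn g hg)
      rw [if_neg hc, ih, List.countP_cons]
      have hp : (decide (∀ g ∈ s, c ∈ g)) = false := decide_eq_false h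
      simp [hp]

-- Membership in B's fold of set intersections.
lemma gg_mem_foldl_inter (gs : List (List String)) (acc : PySem.Set String) (x : String) :
    x ∈ gs.foldl (fun a s => PySem.Set.inter a s) acc ↔ x ∈ acc ∧ ∀ g ∈ gs, x ∈ g := by
  induction gs generalizing acc with
  | nil => simp
  | cons g rest ih =>
    simp only [List.foldl_cons, ih, PySem.Set.mem_inter, List.mem_cons]
    constructor
    · rintro ⟨⟨hx, hg⟩, hrest⟩
      refine ⟨hx, ?_⟩
      rintro y (rfl | hy)
      · exact hg
      · exact hrest y hy
    · rintro ⟨hx, hall⟩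
      exact ⟨⟨hx, hall g (Or.inl rfl)⟩, fun y hy => hall y (Or.inr hy)⟩

-- ===== VERDICT (by name: the statement is the Claim_ definition above) =====
theorem get_group_score_spec : Claim_equal_get_group_score := by
  intro p_group _ hpre
  unfold Spec_get_group_score get_group_score get_group_score_alt
  obtain ⟨g, gs, rfl⟩ : ∃ g gs, p_group = g :: gs := by
    cases p_group with
    | nil => exact absurd rfl hpre
    | cons a b => exact ⟨a, b, rfl⟩
  obtain ⟨m, t, hmt⟩ : ∃ m t, PySem.List.sorted (g :: gs) (fun x => x.length) false = m :: t := by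
    cases h : PySem.List.sorted (g :: gs) (fun x => x.length) false with
    | nil =>
      rw [PySem.List.sorted_eq_nil_iff] at h
      exact absurd h (by simp)
    | cons a b => exact ⟨a, b, rfl⟩
  have hget : PySem.List.pyGet? (m :: t) (0 : Int) = some m := by
    simp [PySem.List.pyGet?, PySem.List.pyIdx?]
  simp only [hmt, hget]
  rw [gg_foldl_A (m :: t) m 0, zero_add, ← List.countP_eq_length_filter]
  congr 1
  apply List.countP_congr
  intro c _
  have hmemL : (∀ g' ∈ (m :: t), c ∈ g') ↔ (∀ g' ∈ (g :: gs), c ∈ g') := by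
    constructor
    · intro h y hy
      apply h
      rw [← hmt]
      exact (PySem.List.mem_sorted _ _ _ _).2 hy
    · intro h y hy
      apply h
      rw [← hmt] at hy
      exact (PySem.List.mem_sorted _ _ _ _).1 hy
  have hcommon : PySem.Set.contains (gs.foldl (fun a s => PySem.Set.inter a s) (PySem.Set.ofList g)) c = true
      ↔ (∀ g' ∈ (g :: gs), c ∈ g') := by
    rw [PySem.Set.contains_iff, gg_mem_foldl_inter, PySem.Set.mem_ofList]
    constructor
    · rintro ⟨hg, hrest⟩ y hy
      rcases List.mem_cons.1 hy with rfl | hy'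
      · exact hg
      · exact hrest y hy'
    · intro h
      exact ⟨h g (List.mem_cons.2 (Or.inl rfl)), fun y hy => h y (List.mem_cons.2 (Or.inr hy))⟩
  cases hb : PySem.Set.contains (gs.foldl (fun a s => PySem.Set.inter a s) (PySem.Set.ofList g)) c with
  | true =>
    have hAll : ∀ g' ∈ (m :: t), c ∈ g' := hmemL.2 (hcommon.1 hb)
    rw [decide_eq_true hAll]
  | false =>
    have hno : ¬ (∀ g' ∈ (m :: t), c ∈ g') := fun hAll => by
      rw [hb] at hcommon
      exact absurd (hcommon.2 (hmemL.1 hAll)) (by simp)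
    rw [decide_eq_false hno]
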